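-- pv_equiv track=rewrite | github.com/xulanxin30-tech/COMP2090SEF-Group-Project-XU-Lan-Xin- | COMP2090SEF-Task2/Task2.py | shell_knuth_gaps
-- ===== SOURCE A (Python) =====
-- from typing import List, Callable, Generator
--
-- def shell_knuth_gaps(n: int) -> Generator[int, None, None]:
--     """Knuth's gaps: (3^k - 1)//2 (..., 13, 4, 1)."""
--     gaps = []
--     k = 1
--     while True:
--         gap = (3**k - 1) // 2
--         if gap > n:
--             break
--         gaps.append(gap)
--         k += 1
--     for gap in reversed(gaps):
--         yield gap
-- ===== SOURCE B (Python) =====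
-- from typing import Generator
--
-- def shell_knuth_gaps(n: int) -> Generator[int, None, None]:
--     """Knuth's gaps via the inverse recurrence, emitted largest-first without a list."""
--     if n < 1:
--         return
--     g = 1
--     while 3 * g + 1 <= n:
--         g = 3 * g + 1
--     while g >= 1:
--         yield g
--         g = (g - 1) // 3
-- ===== Notes on version B (the rewrite author's own statement) =====
-- stated objective: simpler
-- what changed: Drops the accumulated list and the reversed() pass: climbs a single running gap up to the largest Knuth gap not exceeding n via the forward recurrence, then yields the gaps downward via the inverse recurrence, keeping only one integer of state.
import Mathlib
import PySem

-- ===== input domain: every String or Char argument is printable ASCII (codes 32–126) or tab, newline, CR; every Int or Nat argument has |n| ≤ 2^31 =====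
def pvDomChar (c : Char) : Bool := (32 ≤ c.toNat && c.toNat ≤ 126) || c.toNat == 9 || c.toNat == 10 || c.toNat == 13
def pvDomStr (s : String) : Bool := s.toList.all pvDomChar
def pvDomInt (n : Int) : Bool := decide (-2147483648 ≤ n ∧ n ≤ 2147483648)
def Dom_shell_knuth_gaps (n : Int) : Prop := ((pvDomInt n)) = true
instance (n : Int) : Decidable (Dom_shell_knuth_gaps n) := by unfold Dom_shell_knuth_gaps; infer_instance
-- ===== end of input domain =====

-- B replaces A's accumulate-then-reverse list with a single running gap walked up by the
-- forward Knuth recurrence and emitted downward by its inverse (objective: simpler, one integer of state).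
-- Both Pythons are generators; the equivalence is about the yielded sequence as a list.
-- The ports' loops carry an explicit fuel that only makes them total; it is provably
-- sufficient (the gap index exceeds n after at most n.toNat+1 steps), so behaviour matches.

-- ===== PORT A =====
def pvLoopA (fuel : Nat) (n : Int) (k : Nat) (gaps : List Int) : List Int :=
  match fuel with
  | 0 => gaps
  | fuel + 1 =>
    -- gap = (3**k - 1) // 2; if gap > n: break; gaps.append(gap); k += 1
    if PySem.Int.floordiv ((3:Int)^k - 1) 2 > n then gaps
    else pvLoopA fuel n (k+1) (gaps ++ [PySem.Int.floordiv ((3:Int)^k - 1) 2])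

def shell_knuth_gaps (n : Int) : List Int := (pvLoopA (n.toNat + 1) n 1 []).reverse

-- ===== PORT B =====
def pvClimb (fuel : Nat) (n : Int) (g : Nat) : Nat :=
  match fuel with
  | 0 => g
  | fuel + 1 => if 3 * (g:Int) + 1 ≤ n then pvClimb fuel n (3 * g + 1) else g

def pvDescend (fuel : Nat) (g : Nat) : List Int :=
  match fuel with
  | 0 => []
  | fuel + 1 => if 1 ≤ g then (g:Int) :: pvDescend fuel ((g - 1) / 3) else []

def shell_knuth_gaps_alt (n : Int) : List Int :=
  if n < 1 then []
  else
    let g := pvClimb (n.toNat + 1) n 1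
    pvDescend g g

-- ===== PRECONDITION & SPEC =====
def Spec_shell_knuth_gaps (n : Int) (out : List Int) : Prop := out = shell_knuth_gaps_alt n
instance (n : Int) (out : List Int) : Decidable (Spec_shell_knuth_gaps n out) := by unfold Spec_shell_knuth_gaps; infer_instance

-- ===== CLAIM (what is proved, stated in full; the proofs are below) =====
def Claim_equal_shell_knuth_gaps : Prop := ∀ (n : Int), Dom_shell_knuth_gaps n → Spec_shell_knuth_gaps n (shell_knuth_gaps n)

-- ===== LEMMAS AND PROOFS =====

-- pvG k = (3^k - 1)/2, the k-th Knuth gap (pvG 0 = 0, pvG 1 = 1, pvG 2 = 4, …)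
def pvG (k : Nat) : Nat := (3^k - 1) / 2

-- the ascending gap list A's loop accumulates, without the accumulator
def pvAscF (fuel : Nat) (n : Int) (k : Nat) : List Int :=
  match fuel with
  | 0 => []
  | fuel + 1 => if ((pvG k : Nat) : Int) ≤ n then ((pvG k : Nat) : Int) :: pvAscF fuel n (k+1) else []

theorem pvPowOdd (k : Nat) : ∃ a : Nat, 3 ^ k = 2 * a + 1 := by
  induction k with
  | zero => exact ⟨0, rfl⟩
  | succ k ih => obtain ⟨a, ha⟩ := ih; exact ⟨3 * a + 1, by rw [pow_succ]; omega⟩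

theorem pvFd (k : Nat) :
    PySem.Int.floordiv ((3:Int)^k - 1) 2 = ((pvG k : Nat) : Int) := by
  obtain ⟨a, ha⟩ := pvPowOdd k
  rw [PySem.Int.floordiv_eq_ediv_of_pos (by norm_num)]
  have h : (3:Int)^k = ((3^k : Nat) : Int) := by push_cast; ring
  rw [h, ha]; unfold pvG; rw [ha]; push_cast; omega

theorem pvG_succ (k : Nat) : pvG (k+1) = 3 * pvG k + 1 := by
  obtain ⟨a, ha⟩ := pvPowOdd k
  have h : 3^(k+1) = 3 * 3^k := by rw [pow_succ]; ring
  unfold pvG; omega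

theorem pvG_div (k : Nat) : (pvG (k+1) - 1) / 3 = pvG k := by
  have := pvG_succ k; omega

theorem pvG_ge (k : Nat) : k ≤ pvG k := by
  induction k with
  | zero => simp [pvG]
  | succ k ih => have := pvG_succ k; omega

-- A's loop is the accumulator-free ascending list
theorem pvLoopA_eq (n : Int) : ∀ (f k : Nat) (gaps : List Int),
    pvLoopA f n k gaps = gaps ++ pvAscF f n k := by
  intro f
  induction f with
  | zero => intro k gaps; simp [pvLoopA, pvAscF]
  | succ f ih =>
      intro k gaps
      rw [pvLoopA, pvAscF, pvFd k]
      by_cases hc : ((pvG k : Nat) : Int) ≤ n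
      · rw [if_neg (by omega), if_pos hc, ih]
        simp
      · rw [if_pos (by omega), if_neg hc]
        simp

theorem pvAscF_nil (n : Int) (f k : Nat) (h : ¬ ((pvG k : Nat) : Int) ≤ n) :
    pvAscF f n k = [] := by
  cases f with
  | zero => rfl
  | succ f => rw [pvAscF, if_neg h]

-- pvDescend ignores its fuel as long as the fuel covers g
theorem pvDescend_fuel : ∀ (f1 f2 g : Nat), g ≤ f1 → g ≤ f2 →
    pvDescend f1 g = pvDescend f2 g := by
  intro f1
  induction f1 with
  | zero =>
      intro f2 g h1 _
      cases f2 with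
      | zero => rfl
      | succ f2 => rw [pvDescend, pvDescend, if_neg (by omega)]
  | succ f1 ih =>
      intro f2 g h1 h2
      cases f2 with
      | zero => rw [pvDescend, pvDescend, if_neg (by omega)]
      | succ f2 =>
          rw [pvDescend, pvDescend]
          by_cases hg : 1 ≤ g
          · rw [if_pos hg, if_pos hg,
              ih f2 ((g-1)/3) (by have := Nat.div_le_self (g-1) 3; omega)
                (by have := Nat.div_le_self (g-1) 3; omega)]
          · rw [if_neg hg, if_neg hg]

theorem pvDescend_step (k : Nat) :
    pvDescend (pvG (k+1)) (pvG (k+1)) = (pvG (k+1) : Int) :: pvDescend (pvG k) (pvG k) := by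
  have hs := pvG_succ k
  have h1 : 1 ≤ pvG (k+1) := by omega
  conv_lhs => rw [show pvG (k+1) = (pvG (k+1) - 1) + 1 by omega]
  rw [pvDescend, if_pos (by omega)]
  rw [show pvG (k+1) - 1 + 1 - 1 = pvG (k+1) - 1 by omega, pvG_div k]
  rw [pvDescend_fuel (pvG (k+1) - 1) (pvG k) (pvG k) (by omega) (le_refl _)]
  congr 2
  omega

-- the heart: climbing from gap pvG (k+1) and descending equals A's reversed ascent
theorem pvMain (n : Int) : ∀ (f k : Nat), ((pvG (k+1) : Nat) : Int) ≤ n →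
    n < ((pvG (k+1+f) : Nat) : Int) →
    pvDescend (pvClimb f n (pvG (k+1))) (pvClimb f n (pvG (k+1)))
      = (pvAscF f n (k+1)).reverse ++ pvDescend (pvG k) (pvG k) := by
  intro f
  induction f with
  | zero =>
      intro k h hf
      simp only [Nat.add_zero] at hf
      omega
  | succ f ih =>
      intro k h hf
      have hstep : (3 : Int) * ((pvG (k+1) : Nat) : Int) + 1 = ((pvG (k+2) : Nat) : Int) := by
        have := pvG_succ (k+1); push_cast [this]; ring
      rw [pvClimb, pvAscF]
      by_cases h2 : ((pvG (k+2) : Nat) : Int) ≤ n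
      · rw [if_pos (by omega), if_pos h,
          show 3 * pvG (k+1) + 1 = pvG (k+2) from (pvG_succ (k+1)).symm]
        rw [ih (k+1) h2 (by
          have : k + 1 + 1 + f = k + 1 + (f+1) := by omega
          rw [this]; exact hf)]
        rw [pvDescend_step k]
        simp
      · rw [if_neg (by omega), if_pos h]
        rw [pvAscF_nil n f (k+2) h2]
        simp [pvDescend_step k]

-- ===== VERDICT (by name: the statement is the Claim_ definition above) =====
theorem shell_knuth_gaps_spec : Claim_equal_shell_knuth_gaps := by
  intro n _
  unfold Spec_shell_knuth_gaps shell_knuth_gaps shell_knuth_gaps_alt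
  rw [pvLoopA_eq]
  have hG1 : pvG 1 = 1 := by decide
  by_cases hn : n < 1
  · rw [if_pos hn, pvAscF_nil n _ 1 (by rw [hG1]; push_cast; omega)]
    simp
  · rw [if_neg hn]
    have h1 : ((pvG (0+1) : Nat) : Int) ≤ n := by rw [hG1]; push_cast; omega
    have hf : n < ((pvG (0+1+(n.toNat+1)) : Nat) : Int) := by
      have := pvG_ge (0+1+(n.toNat+1))
      omega
    have hmain := pvMain n (n.toNat + 1) 0 h1 hf
    have hz : pvDescend (pvG 0) (pvG 0) = [] := by rfl
    rw [hz, List.append_nil] at hmain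
    simp only [show pvG (0+1) = 1 from hG1] at hmain
    simpa using hmain.symm
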